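-- pv_equiv track=rewrite | github.com/bjornin/adventofcode2020 | day24/day24.py | get_adjacent_black
-- ===== SOURCE A (Python) =====
-- def get_adjacent_black(tiles):
--     black = {}
--     neighbors = [(1, -1, 0), (0, -1, 1), (-1, 0, 1), (-1, 1, 0), (0, 1, -1), (1, 0, -1)]
--     for k in tiles:
--         mid_x, mid_y, mid_z = k
--         b = tiles[k]
--         black[k] = black.get(k, 0)
--         for x, y, z in neighbors:
--             coord = (mid_x + x, mid_y + y, mid_z + z)
--             black[coord] = black.get(coord, 0) + b
--     return black
-- ===== SOURCE B (Python) =====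
-- NEIGHBORS = [(1, -1, 0), (0, -1, 1), (-1, 0, 1), (-1, 1, 0), (0, 1, -1), (1, 0, -1)]
--
--
-- def get_adjacent_black(tiles):
--     # Pass 1: candidate coordinates = every tile key plus its six neighbors,
--     # first-seen order (matches dict insertion order of the push version).
--     cands = {}
--     for (x, y, z) in tiles:
--         cands[(x, y, z)] = None
--         for dx, dy, dz in NEIGHBORS:
--             cands[(x + dx, y + dy, z + dz)] = None
--     # Pass 2: gather — the delta set is symmetric under negation, so the black
--     # count at c is the sum of the tile values at c's six neighbors.
--     return {(x, y, z): sum(tiles.get((x + dx, y + dy, z + dz), 0)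
--                            for dx, dy, dz in NEIGHBORS)
--             for (x, y, z) in cands}
-- ===== Notes on version B (the rewrite author's own statement) =====
-- stated objective: alternative
-- what changed: A scatters each tile's value onto its six neighbors while inserting into one dict; B first collects the candidate coordinate set (keys plus neighbors) in one pass and then gathers each candidate's value as a sum of dict lookups at its six neighbors, exploiting the negation-symmetry of the hex delta set.
import Mathlib
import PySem

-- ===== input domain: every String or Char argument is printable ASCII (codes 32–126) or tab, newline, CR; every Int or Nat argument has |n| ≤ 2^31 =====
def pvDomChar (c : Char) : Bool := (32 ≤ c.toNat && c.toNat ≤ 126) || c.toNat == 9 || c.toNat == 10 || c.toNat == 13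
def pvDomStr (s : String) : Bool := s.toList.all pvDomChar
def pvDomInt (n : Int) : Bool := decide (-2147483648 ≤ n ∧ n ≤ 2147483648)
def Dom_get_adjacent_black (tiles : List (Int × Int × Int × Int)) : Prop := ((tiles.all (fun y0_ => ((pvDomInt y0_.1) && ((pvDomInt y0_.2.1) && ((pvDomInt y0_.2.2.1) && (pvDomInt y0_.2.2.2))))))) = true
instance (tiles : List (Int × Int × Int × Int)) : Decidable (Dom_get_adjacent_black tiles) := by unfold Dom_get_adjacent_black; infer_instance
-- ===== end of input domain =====

-- B replaces A's scatter (push each tile's value onto its six neighbors while inserting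
-- into one dict) by a two-pass gather: collect the candidate coordinates, then sum six
-- dict lookups per candidate, using that the hex delta set is negation-symmetric.
-- The dict argument/result are encoded as association lists ((x, y, z, value)).

-- shared context: the six hex neighbor deltas (module constant of the Python file)
def pvNbrs : List (Int × Int × Int) :=
  [(1, -1, 0), (0, -1, 1), (-1, 0, 1), (-1, 1, 0), (0, 1, -1), (1, 0, -1)]

def pvKey (p : Int × Int × Int × Int) : Int × Int × Int := (p.1, p.2.1, p.2.2.1)

def pvVal (p : Int × Int × Int × Int) : Int := p.2.2.2

def pvAddC (k n : Int × Int × Int) : Int × Int × Int := (k.1 + n.1, k.2.1 + n.2.1, k.2.2 + n.2.2)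

-- tiles[k] / tiles.get(k, 0): first-match lookup in the association list encoding the dict
def pvGetTile (tiles : List (Int × Int × Int × Int)) (k : Int × Int × Int) : Int :=
  ((tiles.find? (fun p => pvKey p == k)).map pvVal).getD 0

-- ===== PORT A =====
-- body of A's outer loop: one key k of the tiles dict
def pvStepA (tiles : List (Int × Int × Int × Int))
    (black : PySem.Dict (Int × Int × Int) Int) (k : Int × Int × Int) :
    PySem.Dict (Int × Int × Int) Int :=
  let b := pvGetTile tiles k                      -- b = tiles[k]
  let black := black.insert k (black.getD k 0)    -- black[k] = black.get(k, 0)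
  pvNbrs.foldl (fun black n =>                    -- for x, y, z in neighbors:
    let coord := pvAddC k n
    black.insert coord (black.getD coord 0 + b)) black

def get_adjacent_black (tiles : List (Int × Int × Int × Int)) : List (Int × Int × Int × Int) :=
  let black := (tiles.map pvKey).foldl (pvStepA tiles) PySem.Dict.empty   -- for k in tiles:
  black.items.map (fun q => (q.1.1, q.1.2.1, q.1.2.2, q.2))

-- ===== PORT B =====
def get_adjacent_black_alt (tiles : List (Int × Int × Int × Int)) : List (Int × Int × Int × Int) :=
  -- pass 1: candidate coordinates (keys plus all neighbors), first-seen order (dict.fromkeys)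
  let cands := PySem.List.dedup
    (tiles.flatMap (fun p => pvKey p :: pvNbrs.map (pvAddC (pvKey p))))
  -- pass 2: gather — sum of tiles.get at the six neighbors of each candidate
  cands.map (fun c =>
    (c.1, c.2.1, c.2.2, (pvNbrs.map (fun n => pvGetTile tiles (pvAddC c n))).sum))

-- ===== PRECONDITION & SPEC =====
-- tiles encodes a Python dict, so its keys (the first three components) are pairwise
-- distinct; Pre_ states exactly that — a list with duplicate keys encodes no dict input,
-- so no input A accepts is excluded.
def Pre_get_adjacent_black (tiles : List (Int × Int × Int × Int)) : Prop :=
  (tiles.map pvKey).Nodup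

instance (tiles : List (Int × Int × Int × Int)) : Decidable (Pre_get_adjacent_black tiles) := by
  unfold Pre_get_adjacent_black; infer_instance

def pvWitness_get_adjacent_black : (List (Int × Int × Int × Int)) :=
  [(0, 0, 0, 1), (1, -1, 0, 0)]

def Spec_get_adjacent_black (tiles : List (Int × Int × Int × Int)) (out : List (Int × Int × Int × Int)) : Prop := out = get_adjacent_black_alt tiles
instance (tiles : List (Int × Int × Int × Int)) (out : List (Int × Int × Int × Int)) : Decidable (Spec_get_adjacent_black tiles out) := by unfold Spec_get_adjacent_black; infer_instance

-- ===== CLAIM (what is proved, stated in full; the proofs are below) =====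
def Claim_equal_get_adjacent_black : Prop := ∀ (tiles : List (Int × Int × Int × Int)), Dom_get_adjacent_black tiles → Pre_get_adjacent_black tiles → Spec_get_adjacent_black tiles (get_adjacent_black tiles)

-- ===== LEMMAS AND PROOFS =====

-- the six neighbor coordinates of k are pairwise distinct
theorem pv_nodup_nbrs (k : Int × Int × Int) : (pvNbrs.map (pvAddC k)).Nodup := by
  obtain ⟨a, b, c⟩ := k
  simp [pvNbrs, pvAddC, Prod.ext_iff]

-- value of the inner scatter loop: each of the pairwise-distinct coordinates g n receives b once
theorem pv_inner_getD {β : Type} (g : β → Int × Int × Int) (l : List β)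
    (hl : (l.map g).Nodup) (d : PySem.Dict (Int × Int × Int) Int)
    (c : Int × Int × Int) (b : Int) :
    (l.foldl (fun bl n => bl.insert (g n) (bl.getD (g n) 0 + b)) d).getD c 0
      = d.getD c 0 + (if c ∈ l.map g then b else 0) := by
  induction l generalizing d with
  | nil => simp
  | cons x xs ih =>
    rw [List.map_cons, List.nodup_cons] at hl
    simp only [List.foldl_cons]
    rw [ih hl.2]
    rcases eq_or_ne c (g x) with h | h
    · subst h
      simp [hl.1]
    · simp [PySem.Dict.getD_insert, h]

-- keys after one outer step: the key itself, then its six neighbors, set-appended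
theorem pv_stepA_keys (tiles : List (Int × Int × Int × Int))
    (d : PySem.Dict (Int × Int × Int) Int) (k : Int × Int × Int) :
    (pvStepA tiles d k).keys
      = PySem.Set.update d.keys (k :: pvNbrs.map (pvAddC k)) := by
  show (pvNbrs.foldl (fun bl n => bl.insert (pvAddC k n) (bl.getD (pvAddC k n) 0 + pvGetTile tiles k))
          (d.insert k (d.getD k 0))).keys = _
  rw [PySem.Dict.keys_foldl_insert_key]
  have hk : (d.insert k (d.getD k 0)).keys = PySem.Set.add d.keys k := by
    by_cases h : d.contains k
    · rw [PySem.Dict.keys_insert_of_contains _ _ h,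
        PySem.Set.add_of_mem ((PySem.Dict.contains_iff_mem_keys d k).mp h)]
    · rw [PySem.Dict.keys_insert_of_not_contains _ _ (by simpa using h),
        PySem.Set.add_of_not_mem]
      intro hm
      exact h ((PySem.Dict.contains_iff_mem_keys d k).mpr hm)
  rw [hk]
  rfl

-- value after one outer step
theorem pv_stepA_getD (tiles : List (Int × Int × Int × Int))
    (d : PySem.Dict (Int × Int × Int) Int) (k c : Int × Int × Int) :
    (pvStepA tiles d k).getD c 0
      = d.getD c 0 + (if c ∈ pvNbrs.map (pvAddC k) then pvGetTile tiles k else 0) := by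
  show (pvNbrs.foldl (fun bl n => bl.insert (pvAddC k n) (bl.getD (pvAddC k n) 0 + pvGetTile tiles k))
          (d.insert k (d.getD k 0))).getD c 0 = _
  rw [pv_inner_getD (pvAddC k) pvNbrs (pv_nodup_nbrs k)]
  rcases eq_or_ne c k with h | h
  · subst h; simp
  · simp [PySem.Dict.getD_insert, h]

-- keys of A's whole fold
theorem pv_A_keys (tiles : List (Int × Int × Int × Int)) :
    ∀ (ks : List (Int × Int × Int)) (d : PySem.Dict (Int × Int × Int) Int),
    (ks.foldl (pvStepA tiles) d).keys
      = PySem.Set.update d.keys (ks.flatMap (fun k => k :: pvNbrs.map (pvAddC k))) := by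
  intro ks
  induction ks with
  | nil => intro d; rfl
  | cons k ks ih =>
    intro d
    simp only [List.foldl_cons, List.flatMap_cons]
    rw [ih, pv_stepA_keys]
    show _ = ((k :: pvNbrs.map (pvAddC k)) ++ ks.flatMap _).foldl PySem.Set.add d.keys
    rw [List.foldl_append]
    rfl

-- value of A's whole fold: sum of contributions, one per processed key
theorem pv_A_getD (tiles : List (Int × Int × Int × Int)) (c : Int × Int × Int) :
    ∀ (ks : List (Int × Int × Int)) (d : PySem.Dict (Int × Int × Int) Int),
    (ks.foldl (pvStepA tiles) d).getD c 0
      = d.getD c 0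
        + (ks.map (fun k => if c ∈ pvNbrs.map (pvAddC k) then pvGetTile tiles k else 0)).sum := by
  intro ks
  induction ks with
  | nil => intro d; simp
  | cons k ks ih =>
    intro d
    simp only [List.foldl_cons, List.map_cons, List.sum_cons]
    rw [ih, pv_stepA_getD]
    ring

-- with distinct keys, looking up a member's own key returns its value
theorem pv_get_key_self (tiles : List (Int × Int × Int × Int))
    (h : (tiles.map pvKey).Nodup) (p : Int × Int × Int × Int) (hp : p ∈ tiles) :
    pvGetTile tiles (pvKey p) = pvVal p := by
  induction tiles with
  | nil => cases hp
  | cons q rest ih =>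
    rw [List.map_cons, List.nodup_cons] at h
    rcases List.mem_cons.mp hp with h1 | h1
    · subst h1; simp [pvGetTile, List.find?]
    · have hne : pvKey q ≠ pvKey p := by
        intro he; exact h.1 (he ▸ List.mem_map_of_mem h1)
      have h2 : pvGetTile (q :: rest) (pvKey p) = pvGetTile rest (pvKey p) := by
        simp [pvGetTile, hne]
      rw [h2, ih h.2 h1]

-- with distinct keys, a dict lookup is the sum of the (at most one) matching value
theorem pv_get_eq_sum (tiles : List (Int × Int × Int × Int))
    (h : (tiles.map pvKey).Nodup) (k : Int × Int × Int) :
    pvGetTile tiles k = (tiles.map (fun p => if pvKey p = k then pvVal p else 0)).sum := by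
  induction tiles with
  | nil => simp [pvGetTile]
  | cons q rest ih =>
    rw [List.map_cons, List.nodup_cons] at h
    by_cases he : pvKey q = k
    · have hz : ((rest.map (fun p => if pvKey p = k then pvVal p else 0))).sum = 0 := by
        apply List.sum_eq_zero
        intro x hx
        rcases List.mem_map.mp hx with ⟨p, hp, rfl⟩
        have hne : pvKey p ≠ k := by
          intro hpk; exact h.1 (he ▸ hpk ▸ List.mem_map_of_mem hp)
        simp [hne]
      simp [pvGetTile, he, hz]
    · have h2 : pvGetTile (q :: rest) k = pvGetTile rest k := by
        simp [pvGetTile, he]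
      rw [h2, ih h.2]
      simp [he]

-- exchange a double sum of integers
theorem pv_sum_swap {α β : Type} (l : List α) (m : List β) (f : α → β → Int) :
    (l.map (fun a => (m.map (f a)).sum)).sum
      = (m.map (fun b => (l.map (fun a => f a b)).sum)).sum := by
  induction l with
  | nil =>
    simp
  | cons a l ih =>
    simp only [List.map_cons, List.sum_cons, ih]
    rw [← PySem.List.sum_map_add_int]

-- negation-symmetry of the delta set: k is a neighbor of c iff c is a neighbor of k
theorem pv_sym (k c : Int × Int × Int) (v : Int) :
    (pvNbrs.map (fun n => if k = pvAddC c n then v else 0)).sum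
      = if c ∈ pvNbrs.map (pvAddC k) then v else 0 := by
  obtain ⟨k1, k2, k3⟩ := k
  obtain ⟨c1, c2, c3⟩ := c
  simp only [pvNbrs, pvAddC, List.map_cons, List.map_nil, List.sum_cons, List.sum_nil,
    List.mem_cons, List.not_mem_nil, or_false, Prod.ext_iff]
  split_ifs <;> omega

-- B's gathered value equals the per-tile contribution sum
theorem pv_B_val (tiles : List (Int × Int × Int × Int))
    (h : (tiles.map pvKey).Nodup) (c : Int × Int × Int) :
    (pvNbrs.map (fun n => pvGetTile tiles (pvAddC c n))).sum
      = (tiles.map (fun p => if c ∈ pvNbrs.map (pvAddC (pvKey p)) then pvVal p else 0)).sum := by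
  have h1 : (pvNbrs.map (fun n => pvGetTile tiles (pvAddC c n)))
      = pvNbrs.map (fun n => (tiles.map (fun p => if pvKey p = pvAddC c n then pvVal p else 0)).sum) := by
    apply List.map_congr_left
    intro n _
    exact pv_get_eq_sum tiles h (pvAddC c n)
  rw [h1, pv_sum_swap]
  apply congrArg
  apply List.map_congr_left
  intro p _
  exact pv_sym (pvKey p) c (pvVal p)

-- ===== VERDICT (by name: the statement is the Claim_ definition above) =====
theorem get_adjacent_black_spec : Claim_equal_get_adjacent_black := by
  intro tiles _ hpre
  unfold Spec_get_adjacent_black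
  simp only [get_adjacent_black, get_adjacent_black_alt]
  set black := (tiles.map pvKey).foldl (pvStepA tiles) PySem.Dict.empty with hb
  have hkeys : black.keys
      = PySem.List.dedup (tiles.flatMap (fun p => pvKey p :: pvNbrs.map (pvAddC (pvKey p)))) := by
    rw [hb, pv_A_keys]
    simp only [PySem.Dict.keys_empty, List.flatMap_map]
    rfl
  have hnodup : black.keys.Nodup := by
    rw [hkeys]; exact PySem.List.nodup_dedup _
  rw [PySem.Dict.items_eq_map_keys black hnodup 0, hkeys, List.map_map]
  apply List.map_congr_left
  intro c _
  have hv : black.getD c 0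
      = (pvNbrs.map (fun n => pvGetTile tiles (pvAddC c n))).sum := by
    rw [hb, pv_A_getD, pv_B_val tiles hpre c]
    simp only [PySem.Dict.getD_empty, List.map_map]
    rw [zero_add]
    apply congrArg
    apply List.map_congr_left
    intro p hp
    by_cases hm : c ∈ pvNbrs.map (pvAddC (pvKey p))
    · simp only [Function.comp, hm, if_true, pv_get_key_self tiles hpre p hp]
    · simp only [Function.comp, hm, if_false]
  simp [hv]
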